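-- pv_equiv track=rewrite | github.com/nango94213/Leetcode-solution | 2560-house-robber-iv/2560-house-robber-iv.py | minCapability
-- ===== SOURCE A (Python) =====
-- from typing import List
--
-- def minCapability(nums: List[int], k: int) -> int:
--     left = min(nums)
--     right = max(nums)
--
--     while left < right:
--         mid = (left+right) // 2
--         switch = False
--         total = 0
--         for n in nums:
--             if not switch:
--                 if n > mid:
--                     continue
--                 total += 1
--                 switch = True
--             else:
--                 switch = False
--                 continue
--         if total < k:
--             left = mid + 1
--         else:
--             right = mid
--     return left
-- ===== SOURCE B (Python) =====
-- from typing import List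
--
-- def _feasible(nums: List[int], k: int, cap: int) -> bool:
--     # right-to-left rolling DP: max number of non-adjacent houses with value <= cap
--     take_next = skip = 0
--     for n in reversed(nums):
--         cur = max(skip, 1 + take_next) if n <= cap else skip
--         take_next, skip = skip, cur
--     return skip >= k
--
-- def minCapability(nums: List[int], k: int) -> int:
--     vals = sorted(set(nums))
--     lo, hi = 0, len(vals) - 1
--     while lo < hi:
--         mid = (lo + hi) // 2
--         if _feasible(nums, k, vals[mid]):
--             hi = mid
--         else:
--             lo = mid + 1
--     return vals[lo]
-- ===== Notes on version B (the rewrite author's own statement) =====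
-- stated objective: alternative
-- what changed: A binary-searches the raw value range [min,max] testing each mid with a greedy 'switch'-flag scan; B instead binary-searches indices of the precomputed sorted(set(nums)) and tests candidates with a right-to-left rolling-DP count of non-adjacent takeable houses, returning the first feasible distinct value (or the largest when k is unattainable, as A does).
import Mathlib
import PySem

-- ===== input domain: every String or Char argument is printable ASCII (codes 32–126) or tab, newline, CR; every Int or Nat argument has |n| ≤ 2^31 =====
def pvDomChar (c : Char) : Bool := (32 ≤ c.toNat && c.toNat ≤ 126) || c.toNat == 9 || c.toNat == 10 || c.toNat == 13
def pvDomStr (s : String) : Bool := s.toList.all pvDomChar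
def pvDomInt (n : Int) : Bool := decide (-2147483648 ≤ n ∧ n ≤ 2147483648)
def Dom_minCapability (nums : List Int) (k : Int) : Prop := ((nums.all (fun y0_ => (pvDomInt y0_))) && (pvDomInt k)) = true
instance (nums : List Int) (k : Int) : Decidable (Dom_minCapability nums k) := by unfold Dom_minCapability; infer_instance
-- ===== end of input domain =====

-- B replaces A's binary search over the raw value range (with its greedy 'switch' scan) by a
-- binary search over indices of sorted(set(nums)), testing candidates with a right-to-left
-- rolling-DP count of non-adjacent takeable houses; same return value on every valid input.

-- ===== PORT A =====
-- A's for-loop body over state (switch, total)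
def pvGreedyStep (mid : Int) (st : Bool × Int) (n : Int) : Bool × Int :=
  match st with
  | (switch, total) =>
    if !switch then
      if n > mid then (switch, total)
      else (true, total + 1)
    else (false, total)

-- A's 'while left < right' loop; the Nat fuel (started at (right - left).toNat) is only a
-- totality guard: right - left strictly shrinks each iteration, so 0 fuel is never reached.
def pvLoopA (nums : List Int) (k : Int) : Nat → Int → Int → Int
  | 0, left, _ => left
  | fuel + 1, left, right =>
    if left < right then
      let mid := PySem.Int.floordiv (left + right) 2
      let total := (nums.foldl (pvGreedyStep mid) (false, 0)).2
      if total < k then pvLoopA nums k fuel (mid + 1) right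
      else pvLoopA nums k fuel left mid
    else left

def minCapability (nums : List Int) (k : Int) : Int :=
  match PySem.List.min? nums (fun x => x), PySem.List.max? nums (fun x => x) with
  | some l, some r => pvLoopA nums k ((r - l).toNat) l r
  | _, _ => 0  -- dead: Python's min()/max() raise ValueError on empty nums (excluded by Pre_)

-- ===== PORT B =====
-- Source B's _feasible: rolling right-to-left DP over state (take_next, skip)
def pvDpStep (cap : Int) (st : Int × Int) (n : Int) : Int × Int :=
  (st.2, if n ≤ cap then max st.2 (1 + st.1) else st.2)

def pvFeasible (nums : List Int) (k cap : Int) : Bool :=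
  decide (k ≤ (nums.reverse.foldl (pvDpStep cap) (0, 0)).2)

def pvVals (nums : List Int) : List Int :=  -- Source B's vals = sorted(set(nums))
  PySem.List.sorted (PySem.Set.ofList nums) (fun x => x) false

-- Source B's 'while lo < hi' index binary search; vals[mid] / vals[lo] are ported as
-- pyGetD _ _ 0, exact here: every run starts from 0 ≤ lo ≤ hi < len vals (nums ≠ []),
-- and the loop keeps the indices in range, so the default 0 is never read inside Pre_.
-- The Nat fuel (startet at len vals ≥ hi - lo) is only a totality guard: the interval
-- width hi - lo strictly shrinks each iteration, so the 0-fuel branch is never reached.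
def pvLoopB (nums : List Int) (k : Int) (vals : List Int) : Nat → Int → Int → Int
  | 0, lo, _ => PySem.List.pyGetD vals lo 0
  | fuel + 1, lo, hi =>
    if lo < hi then
      -- mid = (lo + hi) // 2
      if pvFeasible nums k (PySem.List.pyGetD vals (PySem.Int.floordiv (lo + hi) 2) 0) then
        pvLoopB nums k vals fuel lo (PySem.Int.floordiv (lo + hi) 2)
      else pvLoopB nums k vals fuel (PySem.Int.floordiv (lo + hi) 2 + 1) hi
    else PySem.List.pyGetD vals lo 0

def minCapability_alt (nums : List Int) (k : Int) : Int :=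
  pvLoopB nums k (pvVals nums) (pvVals nums).length 0 ((pvVals nums).length - 1)

-- ===== PRECONDITION & SPEC =====
-- Python's min()/max() (A) and vals[-1] (B) raise on an empty list, so A raises exactly on nums = [].
def Pre_minCapability (nums : List Int) (k : Int) : Prop := nums ≠ []
instance (nums : List Int) (k : Int) : Decidable (Pre_minCapability nums k) := by unfold Pre_minCapability; infer_instance
def pvWitness_minCapability : List Int × Int := ([2, 3, 5, 9], 2)

def Spec_minCapability (nums : List Int) (k : Int) (out : Int) : Prop := out = minCapability_alt nums k
instance (nums : List Int) (k : Int) (out : Int) : Decidable (Spec_minCapability nums k out) := by unfold Spec_minCapability; infer_instance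

-- ===== CLAIM (what is proved, stated in full; the proofs are below) =====
def Claim_equal_minCapability : Prop := ∀ (nums : List Int) (k : Int), Dom_minCapability nums k → Pre_minCapability nums k → Spec_minCapability nums k (minCapability nums k)

-- ===== LEMMAS AND PROOFS =====

-- midpoint bounds of both binary searches
lemma pvMidBoundsA {l r : Int} (h : l < r) :
    l ≤ PySem.Int.floordiv (l + r) 2 ∧ PySem.Int.floordiv (l + r) 2 < r := by
  have h1 := PySem.Int.floordiv_two_mid_bounds (lo := l) (hi := r) (le_of_lt h)
  have h2 : PySem.Int.floordiv (l + r) 2 < r := by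
    rw [PySem.Int.floordiv_lt_iff_lt_mul (by norm_num)]
    omega
  exact ⟨h1.1, h2⟩

-- structural view of B's rolling DP: pvDp cap l = (best for l.tail-suffix, best for l)
def pvDp (cap : Int) : List Int → Int × Int
  | [] => (0, 0)
  | n :: rest =>
    let p := pvDp cap rest
    (p.2, if n ≤ cap then max p.2 (1 + p.1) else p.2)

lemma pvDp_foldl (cap : Int) (nums : List Int) :
    nums.reverse.foldl (pvDpStep cap) (0, 0) = pvDp cap nums := by
  induction nums with
  | nil => simp [pvDp]
  | cons n rest ih =>
    simp only [List.reverse_cons, List.foldl_append, List.foldl_cons, List.foldl_nil, ih]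
    simp [pvDp, pvDpStep]

-- feasibility, shared vocabulary of both proofs
def pvFeas (nums : List Int) (k cap : Int) : Prop := k ≤ (pvDp cap nums).2

lemma pvFeasible_iff (nums : List Int) (k cap : Int) :
    pvFeasible nums k cap = true ↔ pvFeas nums k cap := by
  unfold pvFeasible pvFeas
  rw [pvDp_foldl]
  simp

lemma pvDp_fst_le_snd (cap : Int) (l : List Int) : (pvDp cap l).1 ≤ (pvDp cap l).2 := by
  cases l with
  | nil => simp [pvDp]
  | cons n rest =>
    simp only [pvDp]
    split_ifs with h
    · exact le_max_left _ _
    · exact le_refl _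

lemma pvDp_snd_le_one_add_fst (cap : Int) (l : List Int) :
    (pvDp cap l).2 ≤ 1 + (pvDp cap l).1 := by
  cases l with
  | nil => simp [pvDp]
  | cons n rest =>
    have h1 := pvDp_fst_le_snd cap rest
    simp only [pvDp]
    split_ifs with h
    · simp only [max_le_iff]; omega
    · omega

-- DP value is monotone in the cap
lemma pvDp_mono (l : List Int) {c c' : Int} (h : c ≤ c') :
    (pvDp c l).1 ≤ (pvDp c' l).1 ∧ (pvDp c l).2 ≤ (pvDp c' l).2 := by
  induction l with
  | nil => simp [pvDp]
  | cons n rest ih =>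
    simp only [pvDp]
    split_ifs with h1 h2 <;> constructor <;> omega

-- DP value only depends on which elements fall below the cap
lemma pvDp_congr (l : List Int) {c c' : Int} (h : ∀ n ∈ l, (n ≤ c ↔ n ≤ c')) :
    pvDp c l = pvDp c' l := by
  induction l with
  | nil => rfl
  | cons n rest ih =>
    have hn := h n (by simp)
    have hrest := ih (fun m hm => h m (by simp [hm]))
    simp only [pvDp, hrest]
    by_cases h1 : n ≤ c
    · rw [if_pos h1, if_pos (hn.mp h1)]
    · rw [if_neg h1, if_neg (fun hc' => h1 (hn.mpr hc'))]

-- A's greedy count, structurally (state = the 'switch' flag)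
def pvCount (cap : Int) : Bool → List Int → Int
  | _, [] => 0
  | false, n :: rest => if n > cap then pvCount cap false rest else 1 + pvCount cap true rest
  | true, _ :: rest => pvCount cap false rest

lemma pvGreedy_foldl (cap : Int) (l : List Int) :
    ∀ (sw : Bool) (t : Int), (l.foldl (pvGreedyStep cap) (sw, t)).2 = t + pvCount cap sw l := by
  induction l with
  | nil => intro sw t; simp [pvCount]
  | cons n rest ih =>
    intro sw t
    cases sw with
    | false =>
      by_cases h : n > cap
      · simp [pvGreedyStep, h, ih, pvCount]
      · simp only [List.foldl_cons, pvGreedyStep, h]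
        simp [ih, pvCount, h]
        try omega
    | true => simp [pvGreedyStep, ih, pvCount]; try omega

-- greedy count = DP value (the heart of the equivalence)
lemma pvCount_eq_dp (cap : Int) (l : List Int) :
    pvCount cap false l = (pvDp cap l).2 ∧ pvCount cap true l = (pvDp cap l).1 := by
  induction l with
  | nil => simp [pvCount, pvDp]
  | cons n rest ih =>
    constructor
    · by_cases h : n > cap
      · simp [pvCount, pvDp, h, ih.1, not_le.mpr h]
      · have hle : n ≤ cap := le_of_not_gt h
        have h2 := pvDp_snd_le_one_add_fst cap rest
        have h3 := pvDp_fst_le_snd cap rest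
        simp only [pvCount, if_neg (by omega : ¬ n > cap), ih.2, pvDp, if_pos hle]
        omega
    · simp [pvCount, pvDp, ih.1]

lemma pvTotal_eq_dp (cap : Int) (nums : List Int) :
    (nums.foldl (pvGreedyStep cap) (false, 0)).2 = (pvDp cap nums).2 := by
  rw [pvGreedy_foldl, (pvCount_eq_dp cap nums).1]; omega

-- characterization of "the first feasible cap in [l, r], else r"
def pvIsAns (nums : List Int) (k l r R : Int) : Prop :=
  l ≤ R ∧ R ≤ r ∧ (pvFeas nums k R ∨ R = r) ∧ ∀ c, l ≤ c → c < R → ¬ pvFeas nums k c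

lemma pvIsAns_unique {nums : List Int} {k l r R1 R2 : Int}
    (h1 : pvIsAns nums k l r R1) (h2 : pvIsAns nums k l r R2) : R1 = R2 := by
  obtain ⟨hl1, hr1, hf1, ha1⟩ := h1
  obtain ⟨hl2, hr2, hf2, ha2⟩ := h2
  by_contra hne
  rcases lt_or_gt_of_ne hne with hlt | hlt
  · have : ¬ pvFeas nums k R1 := ha2 R1 hl1 hlt
    rcases hf1 with hf | hf
    · exact this hf
    · omega
  · have : ¬ pvFeas nums k R2 := ha1 R2 hl2 hlt
    rcases hf2 with hf | hf
    · exact this hf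
    · omega

-- A's binary search computes the characterized answer
lemma pvLoopA_isAns (nums : List Int) (k : Int) (fuel : Nat) (l r : Int)
    (h : l ≤ r) (hfuel : (r - l).toNat ≤ fuel) :
    pvIsAns nums k l r (pvLoopA nums k fuel l r) := by
  induction fuel generalizing l r with
  | zero =>
    rw [pvLoopA]
    exact ⟨le_refl l, h, Or.inr (by omega), fun c hc1 hc2 => by omega⟩
  | succ fuel ih =>
    rw [pvLoopA]
    split_ifs with hlr
    · have hmid := pvMidBoundsA hlr
      set mid := PySem.Int.floordiv (l + r) 2 with hmiddef
      simp only [pvTotal_eq_dp]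
      by_cases hk : (pvDp mid nums).2 < k
      · rw [if_pos hk]
        obtain ⟨ihl, ihr, ihf, iha⟩ := ih (mid + 1) r (by omega) (by omega)
        refine ⟨by omega, ihr, ihf, ?_⟩
        intro c hc1 hc2 hfc
        by_cases hcm : c ≤ mid
        · have := (pvDp_mono nums hcm).2
          exact absurd hfc (by unfold pvFeas at *; omega)
        · exact iha c (by omega) hc2 hfc
      · rw [if_neg hk]
        obtain ⟨ihl, ihr, ihf, iha⟩ := ih l mid (by omega) (by omega)
        refine ⟨ihl, by omega, ?_, iha⟩
        rcases ihf with hf | hf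
        · exact Or.inl hf
        · exact Or.inl (by rw [hf]; unfold pvFeas; omega)
    · exact ⟨le_refl l, h, Or.inr (by omega), fun c hc1 hc2 => by omega⟩

-- feasibility is monotone in the cap
lemma pvFeas_mono {nums : List Int} {k c c' : Int} (h : c ≤ c')
    (hf : pvFeas nums k c) : pvFeas nums k c' := by
  have := (pvDp_mono nums h).2
  unfold pvFeas at *; omega

-- on a strictly increasing list, indices order the values
lemma pvPairwise_le {vals : List Int} (hpair : vals.Pairwise (· < ·))
    {p q : ℕ} (hpq : p ≤ q) (hq : q < vals.length) : vals[p] ≤ vals[q] := by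
  rcases Nat.lt_or_ge p q with hlt | hge
  · exact le_of_lt ((List.pairwise_iff_getElem.mp hpair) p q (by omega) hq hlt)
  · have : p = q := by omega
    subst this; exact le_refl _

-- B's index binary search returns vals[i] for the first feasible index i in [lo, hi] (else hi)
lemma pvLoopB_idx (nums : List Int) (k : Int) (vals : List Int)
    (hpair : vals.Pairwise (· < ·)) (fuel : Nat) (lo hi : Int)
    (h0 : 0 ≤ lo) (hlh : lo ≤ hi) (hhi : hi < (vals.length : Int))
    (hfuel : (hi - lo).toNat ≤ fuel) :
    ∃ (i : ℕ) (hlen : i < vals.length),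
      lo ≤ (i : Int) ∧ (i : Int) ≤ hi ∧
      pvLoopB nums k vals fuel lo hi = vals[i] ∧
      (pvFeas nums k vals[i] ∨ (i : Int) = hi) ∧
      ∀ (j : ℕ) (hj : j < vals.length), lo ≤ (j : Int) → j < i → ¬ pvFeas nums k vals[j] := by
  induction fuel generalizing lo hi with
  | zero =>
    have hlohi : lo = hi := by omega
    have hlen : lo.toNat < vals.length := by omega
    rw [pvLoopB, PySem.List.pyGetD_eq_getElem vals 0 h0 (by omega)]
    exact ⟨lo.toNat, hlen, by omega, by omega, rfl, Or.inr (by omega),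
      fun j hj hj0 hji => by omega⟩
  | succ fuel ih =>
    rw [pvLoopB]
    by_cases hlt : lo < hi
    · rw [if_pos hlt]
      have hmid := pvMidBoundsA hlt
      set mid := PySem.Int.floordiv (lo + hi) 2 with hmiddef
      have hmidlen : mid < (vals.length : Int) := by omega
      have hmid0 : 0 ≤ mid := by omega
      rw [PySem.List.pyGetD_eq_getElem vals 0 hmid0 hmidlen]
      by_cases hfm : pvFeasible nums k vals[mid.toNat] = true
      · rw [if_pos hfm]
        obtain ⟨i, hlen, hi1, hi2, hres, hfe, hall⟩ :=
          ih lo mid h0 (by omega) (by omega) (by omega)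
        refine ⟨i, hlen, hi1, by omega, hres, ?_, hall⟩
        left
        rcases hfe with hf | hf
        · exact hf
        · have : i = mid.toNat := by omega
          subst this
          exact (pvFeasible_iff _ _ _).mp hfm
      · rw [if_neg hfm]
        obtain ⟨i, hlen, hi1, hi2, hres, hfe, hall⟩ :=
          ih (mid + 1) hi (by omega) (by omega) hhi (by omega)
        refine ⟨i, hlen, by omega, hi2, hres, hfe, ?_⟩
        intro j hj hj0 hji
        by_cases hjm : (j : Int) ≤ mid
        · intro hf
          have hle : vals[j] ≤ vals[mid.toNat] := pvPairwise_le hpair (by omega) (by omega)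
          exact hfm ((pvFeasible_iff _ _ _).mpr (pvFeas_mono hle hf))
        · exact hall j hj (by omega) hji
    · rw [if_neg hlt]
      have hlohi : lo = hi := by omega
      have hlen : lo.toNat < vals.length := by omega
      rw [PySem.List.pyGetD_eq_getElem vals 0 h0 (by omega)]
      exact ⟨lo.toNat, hlen, by omega, by omega, rfl, Or.inr (by omega),
        fun j hj hj0 hji => by omega⟩

-- if some element of nums is ≤ c and u is not feasible for every u ∈ nums with u ≤ c,
-- then c itself is not feasible (round the cap down to the largest value below it)
lemma pvRoundDown {nums : List Int} {k c : Int}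
    (hex : ∃ m ∈ nums, m ≤ c)
    (hall : ∀ u ∈ nums, u ≤ c → ¬ pvFeas nums k u) : ¬ pvFeas nums k c := by
  obtain ⟨m, hm, hmc⟩ := hex
  -- v := largest element of nums that is ≤ c
  have hfne : nums.filter (fun x => decide (x ≤ c)) ≠ [] := by
    intro hnil
    have : m ∈ nums.filter (fun x => decide (x ≤ c)) := by
      simp [List.mem_filter, hm, hmc]
    rw [hnil] at this; simp at this
  obtain ⟨v, hv⟩ : ∃ v, PySem.List.max? (nums.filter (fun x => decide (x ≤ c))) (fun x => x) = some v := by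
    cases hmx : PySem.List.max? (nums.filter (fun x => decide (x ≤ c))) (fun x => x) with
    | none => exact absurd ((PySem.List.max?_eq_none_iff _ _).mp hmx) hfne
    | some v => exact ⟨v, rfl⟩
  have hvmem := PySem.List.max?_mem hv
  have hvmax := PySem.List.max?_isMax hv
  rw [List.mem_filter] at hvmem
  have hvc : v ≤ c := by simpa using hvmem.2
  have hcongr : pvDp c nums = pvDp v nums := by
    apply pvDp_congr
    intro n hn
    constructor
    · intro hnc
      have : n ∈ nums.filter (fun x => decide (x ≤ c)) := by simp [List.mem_filter, hn, hnc]
      exact hvmax n this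
    · intro hnv; omega
  intro hf
  exact hall v hvmem.1 hvc (by unfold pvFeas at *; rw [hcongr] at hf; exact hf)

-- B's result satisfies the same characterization
lemma pvAlt_isAns (nums : List Int) (k l r : Int)
    (hmin : PySem.List.min? nums (fun x => x) = some l)
    (hmax : PySem.List.max? nums (fun x => x) = some r) :
    pvIsAns nums k l r (minCapability_alt nums k) := by
  have hlmem := PySem.List.min?_mem hmin
  have hrmem := PySem.List.max?_mem hmax
  have hlmin := PySem.List.min?_isMin hmin
  have hrmax := PySem.List.max?_isMax hmax
  have hpair : (pvVals nums).Pairwise (· < ·) := PySem.List.sorted_ofList_pairwise_lt nums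
  have hmemv : ∀ x, x ∈ pvVals nums ↔ x ∈ nums := by
    intro x
    simp only [pvVals, PySem.List.mem_sorted, PySem.Set.mem_ofList]
  have hbounds : ∀ x ∈ pvVals nums, l ≤ x ∧ x ≤ r := by
    intro x hx
    exact ⟨hlmin x ((hmemv x).mp hx), hrmax x ((hmemv x).mp hx)⟩
  have hvne : pvVals nums ≠ [] := by
    intro hnil
    have : l ∈ pvVals nums := (hmemv l).mpr hlmem
    rw [hnil] at this; simp at this
  have hlen0 : 0 < (pvVals nums).length := List.length_pos_iff.mpr hvne
  obtain ⟨i, hlen, hi1, hi2, hres, hfe, hall⟩ :=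
    pvLoopB_idx nums k (pvVals nums) hpair (pvVals nums).length 0 ((pvVals nums).length - 1)
      (le_refl 0) (by omega) (by omega) (by omega)
  have hRmem : (pvVals nums)[i] ∈ pvVals nums := List.getElem_mem hlen
  unfold minCapability_alt
  rw [hres]
  refine ⟨(hbounds _ hRmem).1, (hbounds _ hRmem).2, ?_, ?_⟩
  · rcases hfe with hf | hf
    · exact Or.inl hf
    · -- i is the last index, so vals[i] is the maximum r
      right
      obtain ⟨jr, hjr, hjrv⟩ := List.getElem_of_mem ((hmemv r).mpr hrmem)
      have h1 : (pvVals nums)[jr] ≤ (pvVals nums)[i] := pvPairwise_le hpair (by omega) hlen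
      have h2 : (pvVals nums)[i] ≤ r := (hbounds _ hRmem).2
      omega
  · intro c hc1 hc2
    apply pvRoundDown ⟨l, hlmem, hc1⟩
    intro u hu huc
    obtain ⟨ju, hju, hjuv⟩ := List.getElem_of_mem ((hmemv u).mpr hu)
    have hjui : ju < i := by
      by_contra hge
      have : (pvVals nums)[i] ≤ (pvVals nums)[ju] := pvPairwise_le hpair (by omega) hju
      omega
    have := hall ju hju (by omega) hjui
    rw [hjuv] at this
    exact this

-- ===== VERDICT (by name: the statement is the Claim_ definition above) =====
theorem minCapability_spec : Claim_equal_minCapability := by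
  intro nums k _ hpre
  unfold Spec_minCapability minCapability
  cases hmin : PySem.List.min? nums (fun x => x) with
  | none => exact absurd ((PySem.List.min?_eq_none_iff _ _).mp hmin) hpre
  | some l =>
    cases hmax : PySem.List.max? nums (fun x => x) with
    | none => exact absurd ((PySem.List.max?_eq_none_iff _ _).mp hmax) hpre
    | some r =>
      have hlr : l ≤ r :=
        PySem.List.max?_isMax hmax l (PySem.List.min?_mem hmin)
      exact pvIsAns_unique (pvLoopA_isAns nums k ((r - l).toNat) l r hlr (le_refl _))
        (pvAlt_isAns nums k l r hmin hmax)
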